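-- pv_equiv track=rewrite | github.com/chriswritescode-dev/codedox | src/crawler/extractors/rst.py | find_preceding_heading
-- ===== SOURCE A (Python) =====
-- def find_preceding_heading(lines: list[str], position: int) -> tuple[str | None, int]:
--     """Find RST headings (overlined/underlined)."""
--     heading_text = None
--     heading_line = -1
--
--     # RST heading characters in order of precedence
--     heading_chars = '=-~^_*+#'
--
--     # Search backwards from the code block
--     for i in range(position - 1, -1, -1):
--         if i >= len(lines) - 1:
--             continue
--
--         line = lines[i]
--         next_line = lines[i + 1] if i + 1 < len(lines) else ''
--
--         # Check for underlined heading
--         if next_line and len(next_line.strip()) > 0: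
--             # Check if next line is all the same character
--             char = next_line.strip()[0]
--             if char in heading_chars and all(c == char for c in next_line.strip()):
--                 # Check if underline is at least as long as the text
--                 if len(next_line.strip()) >= len(line.strip()) and line.strip():
--                     heading_text = line.strip()
--                     heading_line = i
--                     break
--
--         # Check for overlined + underlined heading
--         if i > 0:
--             prev_line = lines[i - 1] if i > 0 else ''
--             if prev_line and next_line:
--                 # Check if both prev and next lines are the same character
--                 if prev_line.strip() and next_line.strip():
--                     char = prev_line.strip()[0]
--                     if (char in heading_chars and
--                         all(c == char for c in prev_line.strip()) and
--                         all(c == char for c in next_line.strip()) and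
--                         len(prev_line.strip()) >= len(line.strip()) and
--                         len(next_line.strip()) >= len(line.strip()) and
--                         line.strip()):
--                         heading_text = line.strip()
--                         heading_line = i
--                         break
--
--     return heading_text, heading_line
-- ===== SOURCE B (Python) =====
-- HEADING_CHARS = '=-~^_*+#'
--
--
-- def _is_rule(s):
--     """True iff s.strip() is a non-empty run of one RST heading character."""
--     t = s.strip()
--     return bool(t) and t[0] in HEADING_CHARS and all(c == t[0] for c in t)
--
--
-- def _qualifies(lines, i):
--     """Is line i a heading (underlined, or, for i > 0, overlined+underlined)?"""
--     line = lines[i].strip()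
--     if not line:
--         return False
--     nxt = lines[i + 1].strip()
--     if _is_rule(lines[i + 1]) and len(nxt) >= len(line):
--         return True
--     if i > 0:
--         prv = lines[i - 1].strip()
--         if (prv and nxt and _is_rule(lines[i - 1])
--                 and all(c == prv[0] for c in nxt)
--                 and len(prv) >= len(line) and len(nxt) >= len(line)):
--             return True
--     return False
--
--
-- def find_preceding_heading(lines: list[str], position: int) -> tuple[str | None, int]:
--     """Forward pass over the valid index range; keep the last qualifying heading."""
--     best = (None, -1)
--     upper = min(position, len(lines) - 1)  # i ranges over 0 .. upper-1, so i+1 is valid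
--     for i in range(upper):
--         if _qualifies(lines, i):
--             best = (lines[i].strip(), i)
--     return best
-- ===== Notes on version B (the rewrite author's own statement) =====
-- stated objective: alternative
-- what changed: Replaces A's backward early-exit scan (range(position-1,-1,-1) with break) by a forward pass over the valid index range 0..min(position,len-1)-1 that overwrites a 'best' pair at every qualifying heading, with the underline/overline heading test factored into a shared predicate; the last qualifying index dominates, matching A's first-from-the-back hit.
import Mathlib
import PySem

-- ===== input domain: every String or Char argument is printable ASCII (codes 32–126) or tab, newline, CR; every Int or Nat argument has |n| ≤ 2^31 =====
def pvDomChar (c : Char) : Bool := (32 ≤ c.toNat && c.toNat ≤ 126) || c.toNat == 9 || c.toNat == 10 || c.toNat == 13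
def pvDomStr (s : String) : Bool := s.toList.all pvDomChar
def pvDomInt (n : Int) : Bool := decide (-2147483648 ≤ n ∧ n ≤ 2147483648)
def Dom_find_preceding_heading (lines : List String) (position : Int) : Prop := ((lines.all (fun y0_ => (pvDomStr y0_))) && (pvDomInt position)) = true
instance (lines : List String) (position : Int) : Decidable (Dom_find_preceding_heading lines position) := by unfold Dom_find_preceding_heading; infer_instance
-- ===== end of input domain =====

-- B replaces A's backward early-exit scan by a forward build-then-select pass (keep the
-- last qualifying heading) with the heading test factored into a predicate; objective: alternative.

-- ===== PORT A =====
def pvHeadingChars : List Char := ['=', '-', '~', '^', '_', '*', '+', '#']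

-- the backward 'for i in range(position-1, -1, -1)' loop with its break, as recursion on i
def pvLoopA (lines : List String) (i : Int) : Option String × Int :=
  if i < 0 then (none, -1)
  else if (lines.length : Int) - 1 ≤ i then pvLoopA lines (i - 1)
  else
    let line := (PySem.List.pyGet? lines i).getD ""
    let next_line := if i + 1 < (lines.length : Int) then (PySem.List.pyGet? lines (i + 1)).getD "" else ""
    let ls := (PySem.Str.strip line).toList
    let ns := (PySem.Str.strip next_line).toList
    let under : Bool :=
      next_line != "" && decide (0 < ns.length) &&
      (match ns with
       | [] => false
       | c :: _ =>
         pvHeadingChars.contains c && ns.all (· == c) &&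
         (decide (ls.length ≤ ns.length) && !ls.isEmpty))
    if under then (some (PySem.Str.strip line), i)
    else if 0 < i then
      let prev_line := (PySem.List.pyGet? lines (i - 1)).getD ""
      let ps := (PySem.Str.strip prev_line).toList
      let overC : Bool :=
        prev_line != "" && next_line != "" && !ps.isEmpty && !ns.isEmpty &&
        (match ps with
         | [] => false
         | c :: _ =>
           pvHeadingChars.contains c && ps.all (· == c) && ns.all (· == c) &&
           decide (ls.length ≤ ps.length) && decide (ls.length ≤ ns.length) && !ls.isEmpty)
      if overC then (some (PySem.Str.strip line), i) else pvLoopA lines (i - 1)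
    else pvLoopA lines (i - 1)
termination_by (i + 1).toNat
decreasing_by all_goals omega

def find_preceding_heading (lines : List String) (position : Int) : Option String × Int :=
  pvLoopA lines (position - 1)

-- ===== PORT B =====
def pvIsRule (s : String) : Bool :=
  let t := (PySem.Str.strip s).toList
  match t with
  | [] => false
  | c :: _ => pvHeadingChars.contains c && t.all (· == c)

def pvQual (lines : List String) (i : Int) : Bool :=
  let line := (PySem.Str.strip ((PySem.List.pyGet? lines i).getD "")).toList
  if line.isEmpty then false
  else
    let nxtS := (PySem.List.pyGet? lines (i + 1)).getD ""
    let nxt := (PySem.Str.strip nxtS).toList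
    if pvIsRule nxtS && decide (line.length ≤ nxt.length) then true
    else if 0 < i then
      let prvS := (PySem.List.pyGet? lines (i - 1)).getD ""
      let prv := (PySem.Str.strip prvS).toList
      !prv.isEmpty && !nxt.isEmpty && pvIsRule prvS &&
      (match prv with | [] => false | c :: _ => nxt.all (· == c)) &&
      decide (line.length ≤ prv.length) && decide (line.length ≤ nxt.length)
    else false

def find_preceding_heading_alt (lines : List String) (position : Int) : Option String × Int :=
  let upper := min position ((lines.length : Int) - 1)
  (PySem.List.pyRange 0 upper 1).foldl
    (fun best i =>
      if pvQual lines i then (some (PySem.Str.strip ((PySem.List.pyGet? lines i).getD "")), i) else best)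
    (none, -1)

-- ===== PRECONDITION & SPEC =====
def Spec_find_preceding_heading (lines : List String) (position : Int) (out : Option String × Int) : Prop := out = find_preceding_heading_alt lines position
instance (lines : List String) (position : Int) (out : Option String × Int) : Decidable (Spec_find_preceding_heading lines position out) := by unfold Spec_find_preceding_heading; infer_instance

-- ===== CLAIM (what is proved, stated in full; the proofs are below) =====
def Claim_equal_find_preceding_heading : Prop := ∀ (lines : List String) (position : Int), Dom_find_preceding_heading lines position → Spec_find_preceding_heading lines position (find_preceding_heading lines position)

-- ===== LEMMAS AND PROOFS =====

-- the strip of a string is non-empty only if the string itself is non-empty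
lemma pvStrip_ne_nil_imp (s : String) (h : (PySem.Str.strip s).toList ≠ []) : (s != "") = true := by
  simp only [bne_iff_ne, ne_eq]
  intro he; subst he; exact h (by decide)

-- A's if-chain (underline, then guarded overline, break vs continue) as one boolean test
lemma pvIf_chain {α : Type} (U O : Bool) (P : Prop) [Decidable P] (r x : α) :
    (if U then r else if P then (if O then r else x) else x) =
      if (U || (decide P && O)) then r else x := by
  by_cases hP : P <;> cases U <;> cases O <;> simp [hP]

-- A's inline heading conditions at index i coincide with B's predicate pvQual
lemma pvCond_eq (lines : List String) (i : Int) :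
    (let line := (PySem.List.pyGet? lines i).getD ""
     let next_line := (PySem.List.pyGet? lines (i + 1)).getD ""
     let ls := (PySem.Str.strip line).toList
     let ns := (PySem.Str.strip next_line).toList
     let under : Bool :=
       next_line != "" && decide (0 < ns.length) &&
       (match ns with
        | [] => false
        | c :: _ =>
          pvHeadingChars.contains c && ns.all (· == c) &&
          (decide (ls.length ≤ ns.length) && !ls.isEmpty))
     let prev_line := (PySem.List.pyGet? lines (i - 1)).getD ""
     let ps := (PySem.Str.strip prev_line).toList
     let overC : Bool :=
       prev_line != "" && next_line != "" && !ps.isEmpty && !ns.isEmpty &&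
       (match ps with
        | [] => false
        | c :: _ =>
          pvHeadingChars.contains c && ps.all (· == c) && ns.all (· == c) &&
          decide (ls.length ≤ ps.length) && decide (ls.length ≤ ns.length) && !ls.isEmpty)
     (under || (decide (0 < i) && overC))) = pvQual lines i := by
  simp only [pvQual, pvIsRule]
  rcases hns : (PySem.Str.strip ((PySem.List.pyGet? lines (i + 1)).getD "")).toList with _ | ⟨c, ns'⟩ <;>
    rcases hps : (PySem.Str.strip ((PySem.List.pyGet? lines (i - 1)).getD "")).toList with _ | ⟨d, ps'⟩ <;>
    rcases hls : (PySem.Str.strip ((PySem.List.pyGet? lines i).getD "")).toList with _ | ⟨e, ls'⟩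
  case nil.nil.nil => simp
  case nil.nil.cons => simp
  case nil.cons.nil => simp
  case nil.cons.cons => simp
  case cons.nil.nil =>
    have h1 := pvStrip_ne_nil_imp ((PySem.List.pyGet? lines (i + 1)).getD "") (by rw [hns]; simp)
    rw [Bool.eq_iff_iff]; simp [h1]
  case cons.nil.cons =>
    have h1 := pvStrip_ne_nil_imp ((PySem.List.pyGet? lines (i + 1)).getD "") (by rw [hns]; simp)
    rw [Bool.eq_iff_iff]; simp [h1]
  case cons.cons.nil =>
    have h1 := pvStrip_ne_nil_imp ((PySem.List.pyGet? lines (i + 1)).getD "") (by rw [hns]; simp)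
    have h2 := pvStrip_ne_nil_imp ((PySem.List.pyGet? lines (i - 1)).getD "") (by rw [hps]; simp)
    rw [Bool.eq_iff_iff]; simp [h1, h2]
  case cons.cons.cons =>
    have h1 := pvStrip_ne_nil_imp ((PySem.List.pyGet? lines (i + 1)).getD "") (by rw [hns]; simp)
    have h2 := pvStrip_ne_nil_imp ((PySem.List.pyGet? lines (i - 1)).getD "") (by rw [hps]; simp)
    rw [Bool.eq_iff_iff]; simp [h1, h2]

-- the backward loop from i equals B's forward fold over 0 .. min(i+1, len-1)
lemma pvLoopA_eq_fold (lines : List String) (i : Int) :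
    pvLoopA lines i =
      (PySem.List.pyRange 0 (min (i + 1) ((lines.length : Int) - 1)) 1).foldl
        (fun best j =>
          if pvQual lines j then (some (PySem.Str.strip ((PySem.List.pyGet? lines j).getD "")), j) else best)
        (none, -1) := by
  induction hk : (i + 1).toNat using Nat.strong_induction_on generalizing i with
  | _ k IH =>
  by_cases h1 : i < 0
  · rw [pvLoopA, if_pos h1, PySem.List.pyRange_one_eq_nil (by omega)]
    rfl
  · by_cases h2 : (lines.length : Int) - 1 ≤ i
    · rw [pvLoopA, if_neg h1, if_pos h2, IH (i - 1 + 1).toNat (by omega) (i - 1) rfl]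
      have he : min (i - 1 + 1) ((lines.length : Int) - 1) = min (i + 1) ((lines.length : Int) - 1) := by omega
      rw [he]
    · rw [pvLoopA, if_neg h1, if_neg h2]
      have hmin : min (i + 1) ((lines.length : Int) - 1) = i + 1 := by omega
      have hmin' : min (i - 1 + 1) ((lines.length : Int) - 1) = i := by omega
      rw [hmin, PySem.List.pyRange_one_succ_right (show (0:Int) ≤ i by omega), List.foldl_append]
      simp only [List.foldl_cons, List.foldl_nil]
      rw [IH (i - 1 + 1).toNat (by omega) (i - 1) rfl, hmin']
      simp only [if_pos (show i + 1 < (lines.length : Int) by omega)]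
      rw [pvIf_chain]
      rw [pvCond_eq lines i]

-- ===== VERDICT (by name: the statement is the Claim_ definition above) =====
theorem find_preceding_heading_spec : Claim_equal_find_preceding_heading := by
  intro lines position _
  show _ = _
  unfold find_preceding_heading find_preceding_heading_alt
  rw [pvLoopA_eq_fold]
  norm_num
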